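-- pv_equiv track=rewrite | github.com/espinel10/HackerRank | Algorithms/string/Anagram.py | anagram
-- ===== SOURCE A (Python) =====
-- def anagram(s):
--     entrada=list(s)
--     if len(entrada)%2!=0:
--         return -1
--     mit=int(len(entrada)/2)
--     a=entrada[:mit]
--     b=entrada[mit:]
--     cont=0
--
--     for j in a:
--         if j in b :
--             cont=cont+1
--             b.remove(j)
--     salida=len(a)-cont
--     return salida
-- ===== SOURCE B (Python) =====
-- def anagram(s):
--     if len(s) % 2 != 0:
--         return -1
--     mit = len(s) // 2
--     a = sorted(s[:mit])
--     b = sorted(s[mit:])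
--     i = j = matched = 0
--     while i < mit and j < mit:
--         if a[i] == b[j]:
--             matched += 1
--             i += 1
--             j += 1
--         elif a[i] < b[j]:
--             i += 1
--         else:
--             j += 1
--     return mit - matched
-- ===== Notes on version B (the rewrite author's own statement) =====
-- stated objective: faster
-- what changed: B sorts the two halves and counts matched characters with a two-pointer merge over the sorted lists, replacing A's per-character membership test plus list.remove scan with sort-then-merge.
import Mathlib
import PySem

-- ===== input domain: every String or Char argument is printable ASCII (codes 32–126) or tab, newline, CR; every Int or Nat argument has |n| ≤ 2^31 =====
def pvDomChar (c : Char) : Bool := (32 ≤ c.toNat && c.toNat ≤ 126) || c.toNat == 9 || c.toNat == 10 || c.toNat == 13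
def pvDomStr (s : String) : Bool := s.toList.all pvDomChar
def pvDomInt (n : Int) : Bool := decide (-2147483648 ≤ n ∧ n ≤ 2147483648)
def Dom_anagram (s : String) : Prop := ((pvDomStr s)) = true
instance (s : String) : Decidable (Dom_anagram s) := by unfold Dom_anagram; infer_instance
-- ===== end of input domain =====

-- B sorts the two halves and counts matches with a two-pointer merge, replacing A's
-- per-character membership-test-and-remove scan over the second half (faster).
-- ===== PORT A =====
-- for j in a: if j in b: cont += 1; b.remove(j)   (b.remove on a present element = PySem.List.remove?, guarded)
def anagramLoopA : List Char → List Char → Int → Int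
  | [], _, cont => cont
  | j :: rest, b, cont =>
    if j ∈ b then anagramLoopA rest ((PySem.List.remove? b j).getD b) (cont + 1)
    else anagramLoopA rest b cont

def anagram (s : String) : Int :=
  let entrada := s.toList
  if entrada.length % 2 ≠ 0 then -1
  else
    let mit := entrada.length / 2     -- int(len/2) on an even nonnegative length
    let a := entrada.take mit         -- entrada[:mit], 0 ≤ mit ≤ len: slice = take (exact)
    let b := entrada.drop mit         -- entrada[mit:] : slice = drop (exact)
    (a.length : Int) - anagramLoopA a b 0

-- ===== PORT B =====
-- the while loop over indices i, j: recursion consuming the heads of the two sorted lists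
def mergeCount : List Char → List Char → Int → Int
  | x :: xs, y :: ys, m =>
    if x = y then mergeCount xs ys (m + 1)
    else if x < y then mergeCount xs (y :: ys) m
    else mergeCount (x :: xs) ys m
  | _, _, m => m
termination_by xs ys _ => xs.length + ys.length

def anagram_alt (s : String) : Int :=
  if s.toList.length % 2 ≠ 0 then -1
  else
    let mit := s.toList.length / 2
    let a := PySem.List.sorted (s.toList.take mit) (fun x => x) false   -- sorted(s[:mit])
    let b := PySem.List.sorted (s.toList.drop mit) (fun x => x) false   -- sorted(s[mit:])
    (mit : Int) - mergeCount a b 0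

-- ===== PRECONDITION & SPEC =====
def Spec_anagram (s : String) (out : Int) : Prop := out = anagram_alt s
instance (s : String) (out : Int) : Decidable (Spec_anagram s out) := by unfold Spec_anagram; infer_instance

-- ===== CLAIM (what is proved, stated in full; the proofs are below) =====
def Claim_equal_anagram : Prop := ∀ (s : String), Dom_anagram s → Spec_anagram s (anagram s)

-- ===== LEMMAS AND PROOFS =====
-- A's scan computes the cardinality of the multiset intersection of the two halves.
lemma loopA_inter (a : List Char) : ∀ (b : List Char) (cont : Int),
    anagramLoopA a b cont = cont + (((a : Multiset Char) ∩ (b : Multiset Char)).card : Int) := by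
  induction a with
  | nil => intro b cont; simp [anagramLoopA]
  | cons j rest ih =>
    intro b cont
    simp only [anagramLoopA]
    by_cases hb : j ∈ b
    · have herase : (PySem.List.remove? b j).getD b = b.erase j := by
        rw [PySem.List.remove?_eq_some_erase b j hb]; rfl
      rw [if_pos hb, herase, ih]
      have : ((j :: rest : List Char) : Multiset Char) ∩ (b : Multiset Char)
          = j ::ₘ ((rest : Multiset Char) ∩ ((b : Multiset Char).erase j)) := by
        exact Multiset.cons_inter_of_pos (rest : Multiset Char)
          (show j ∈ (b : Multiset Char) by simpa using hb)
      rw [show ((j :: rest : List Char) : Multiset Char) = j ::ₘ (rest : Multiset Char) from rfl] at this ⊢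
      rw [this, Multiset.card_cons, ← Multiset.coe_erase]
      push_cast; ring
    · rw [if_neg hb, ih]
      have : (j ::ₘ (rest : Multiset Char)) ∩ (b : Multiset Char)
          = (rest : Multiset Char) ∩ (b : Multiset Char) :=
        Multiset.cons_inter_of_neg _ (by simpa using hb)
      rw [show ((j :: rest : List Char) : Multiset Char) = j ::ₘ (rest : Multiset Char) from rfl, this]

-- B's merge computes the same cardinality, when both lists are sorted.
lemma mergeCount_inter : ∀ (xs ys : List Char) (m : Int),
    xs.Pairwise (· ≤ ·) → ys.Pairwise (· ≤ ·) →
    mergeCount xs ys m = m + (((xs : Multiset Char) ∩ (ys : Multiset Char)).card : Int)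
  | [], ys, m, _, _ => by simp [mergeCount]
  | x :: xs, [], m, _, _ => by simp [mergeCount]
  | x :: xs, y :: ys, m, hx, hy => by
    simp only [mergeCount]
    have hx' := (List.pairwise_cons.mp hx).2
    have hy' := (List.pairwise_cons.mp hy).2
    by_cases hxy : x = y
    · subst hxy
      rw [if_pos rfl, mergeCount_inter xs ys (m + 1) hx' hy']
      have : ((x :: xs : List Char) : Multiset Char) ∩ ((x :: ys : List Char) : Multiset Char)
          = x ::ₘ ((xs : Multiset Char) ∩ (ys : Multiset Char)) := by
        rw [show ((x :: xs : List Char) : Multiset Char) = x ::ₘ (xs : Multiset Char) from rfl,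
            Multiset.cons_inter_of_pos _ (by simp : x ∈ ((x :: ys : List Char) : Multiset Char))]
        congr 1
        rw [show ((x :: ys : List Char) : Multiset Char) = x ::ₘ (ys : Multiset Char) from rfl,
            Multiset.erase_cons_head]
      rw [this, Multiset.card_cons]; push_cast; ring
    · rw [if_neg hxy]
      by_cases hlt : x < y
      · rw [if_pos hlt, mergeCount_inter xs (y :: ys) m hx' hy]
        have hnot : x ∉ ((y :: ys : List Char) : Multiset Char) := by
          simp only [Multiset.mem_coe, List.mem_cons]
          rintro (rfl | hmem)
          · exact lt_irrefl x hlt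
          · exact absurd hlt (not_lt.mpr ((List.pairwise_cons.mp hy).1 x hmem))
        rw [show ((x :: xs : List Char) : Multiset Char) = x ::ₘ (xs : Multiset Char) from rfl,
            Multiset.cons_inter_of_neg _ hnot]
      · rw [if_neg hlt, mergeCount_inter (x :: xs) ys m hx hy']
        have hylt : y < x := lt_of_le_of_ne (not_lt.mp hlt) (Ne.symm hxy)
        have hnot : y ∉ ((x :: xs : List Char) : Multiset Char) := by
          simp only [Multiset.mem_coe, List.mem_cons]
          rintro (rfl | hmem)
          · exact lt_irrefl y hylt
          · exact absurd hylt (not_lt.mpr ((List.pairwise_cons.mp hx).1 y hmem))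
        have : ((x :: xs : List Char) : Multiset Char) ∩ ((y :: ys : List Char) : Multiset Char)
            = ((x :: xs : List Char) : Multiset Char) ∩ (ys : Multiset Char) := by
          rw [Multiset.inter_comm,
              show ((y :: ys : List Char) : Multiset Char) = y ::ₘ (ys : Multiset Char) from rfl,
              Multiset.cons_inter_of_neg _ hnot, Multiset.inter_comm]
        rw [this]
termination_by xs ys _ => xs.length + ys.length

-- ===== VERDICT (by name: the statement is the Claim_ definition above) =====
theorem anagram_spec : Claim_equal_anagram := by
  intro s _
  unfold Spec_anagram anagram anagram_alt
  dsimp only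
  by_cases hpar : s.toList.length % 2 ≠ 0
  · rw [if_pos hpar, if_pos hpar]
  · rw [if_neg hpar, if_neg hpar]
    set mit := s.toList.length / 2 with hmit
    set ta := s.toList.take mit
    set tb := s.toList.drop mit
    rw [loopA_inter,
        mergeCount_inter _ _ 0
          (by simpa using PySem.List.sorted_pairwise ta (fun x => x) )
          (by simpa using PySem.List.sorted_pairwise tb (fun x => x))]
    have hpa : ((PySem.List.sorted ta (fun x => x) false : List Char) : Multiset Char) = (ta : Multiset Char) :=
      Multiset.coe_eq_coe.mpr (PySem.List.sorted_perm ta (fun x => x) false)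
    have hpb : ((PySem.List.sorted tb (fun x => x) false : List Char) : Multiset Char) = (tb : Multiset Char) :=
      Multiset.coe_eq_coe.mpr (PySem.List.sorted_perm tb (fun x => x) false)
    rw [hpa, hpb]
    have hlen : ta.length = mit := by
      simp [ta, hmit]; omega
    rw [hlen]
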